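-- pv_equiv track=rewrite | github.com/RajeevTricel/gemma-seo-agent | agent/run_eval.py | section_lengths_ok
-- ===== SOURCE A (Python) =====
-- def section_lengths_ok(response: str, max_words_per_section: int = 60) -> bool:
--     sections = ["Diagnosis:", "Evidence:", "Priority:", "Fix:", "Next action:"]
--
--     for i, heading in enumerate(sections):
--         start = response.find(heading)
--         if start == -1:
--             return False
--
--         end = len(response)
--         if i + 1 < len(sections):
--             next_heading = response.find(sections[i + 1])
--             if next_heading != -1:
--                 end = next_heading
--
--         section_text = response[start:end]
--         word_count = len(section_text.split())
--
--         if word_count > max_words_per_section: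
--             return False
--
--     return True
-- ===== SOURCE B (Python) =====
-- def section_lengths_ok(response: str, max_words_per_section: int = 60) -> bool:
--     sections = ["Diagnosis:", "Evidence:", "Priority:", "Fix:", "Next action:"]
--
--     # stage 1: locate every heading; all must be present
--     positions = []
--     for h in sections:
--         p = response.find(h)
--         if p == -1:
--             return False
--         positions.append(p)
--
--     # stage 2: count the words of each section with a word-boundary state
--     # machine over a precomputed isspace table -- no slicing, no split()
--     sp = [c.isspace() for c in response]
--     bounds = positions + [len(response)]
--     for k in range(len(sections)):
--         count = 0
--         in_word = False
--         for i in range(bounds[k], bounds[k + 1]):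
--             if sp[i]:
--                 in_word = False
--             elif not in_word:
--                 count += 1
--                 in_word = True
--         if count > max_words_per_section:
--             return False
--     return True
-- ===== Notes on version B (the rewrite author's own statement) =====
-- stated objective: alternative
-- what changed: B splits A's single interleaved loop into two staged passes and replaces the slice+split() word counting entirely: it locates all headings first, then counts each section's words with an in_word/count state machine running over a precomputed per-character isspace table, so no substring is ever materialised and split() is never called.
import Mathlib
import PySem

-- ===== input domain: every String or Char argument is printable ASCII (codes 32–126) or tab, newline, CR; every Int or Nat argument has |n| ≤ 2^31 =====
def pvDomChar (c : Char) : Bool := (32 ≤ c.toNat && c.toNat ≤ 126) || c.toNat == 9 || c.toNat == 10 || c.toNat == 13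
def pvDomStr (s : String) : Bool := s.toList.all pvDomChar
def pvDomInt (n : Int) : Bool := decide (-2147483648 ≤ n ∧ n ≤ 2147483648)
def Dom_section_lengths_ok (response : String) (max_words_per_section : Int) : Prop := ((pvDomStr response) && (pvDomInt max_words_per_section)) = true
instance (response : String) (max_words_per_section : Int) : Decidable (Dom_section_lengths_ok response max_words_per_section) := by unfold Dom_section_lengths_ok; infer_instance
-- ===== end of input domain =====

-- B replaces A's interleaved find / slice / split() loop by two staged passes:
-- locate all headings first, then count each section's words with a word-boundary
-- state machine over a precomputed isspace table (no slicing, no split);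
-- objective: alternative (same cost, different mechanism for the word counts).

-- ===== PORT A =====
-- A's loop over enumerate(sections): head = current heading, rest carries sections[i+1:]
-- (so 'i + 1 < len(sections)' is 'rest nonempty' and 'sections[i+1]' is rest's head).
def pvLoopA (response : String) (m : Int) : List String → Bool
  | [] => true
  | heading :: rest =>
    let start := PySem.Str.find response heading
    if start = -1 then false
    else
      let e : Int :=
        match rest with
        | [] => (PySem.Str.len response : Int)
        | next :: _ =>
          let nh := PySem.Str.find response next
          if nh ≠ -1 then nh else (PySem.Str.len response : Int)
      let sectionText := PySem.Str.slice response (some start) (some e)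
      let wordCount : Int := ((PySem.Str.split₀ sectionText).length : Int)
      if wordCount > m then false else pvLoopA response m rest

def section_lengths_ok (response : String) (max_words_per_section : Int) : Bool :=
  pvLoopA response max_words_per_section
    ["Diagnosis:", "Evidence:", "Priority:", "Fix:", "Next action:"]

-- ===== PORT B =====
-- Source B stage 1: the loop collecting response.find(h) for every heading,
-- returning False (none) at the first missing one.
def pvPositionsB (response : String) : List String → Option (List Int)
  | [] => some []
  | h :: rest =>
    let p := PySem.Str.find response h
    if p = -1 then none
    else (pvPositionsB response rest).map (fun ps => p :: ps)

-- Source B inner loop: word-boundary state machine over sp for i in range(a, b).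
def pvCountWordsB (sp : List Bool) (a b : Int) : Int × Bool :=
  (PySem.List.pyRange a b 1).foldl
    (fun st i =>
      if PySem.List.pyGetD sp i false then (st.1, false)
      else if st.2 = false then (st.1 + 1, true)
      else st)
    (0, false)

-- Source B stage 2: for k in range(len(sections)) over bounds[k], bounds[k+1].
def pvLoopB (sp : List Bool) (m : Int) : List Int → Bool
  | [] => true
  | [_] => true
  | a :: b :: rest =>
    if (pvCountWordsB sp a b).1 > m then false else pvLoopB sp m (b :: rest)

def section_lengths_ok_alt (response : String) (max_words_per_section : Int) : Bool :=
  let sections : List String := ["Diagnosis:", "Evidence:", "Priority:", "Fix:", "Next action:"]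
  match pvPositionsB response sections with
  | none => false
  | some positions =>
    let sp : List Bool := response.toList.map PySem.Chars.isspace
    let bounds : List Int := positions ++ [(PySem.Str.len response : Int)]
    pvLoopB sp max_words_per_section bounds

-- ===== PRECONDITION & SPEC =====
def Spec_section_lengths_ok (response : String) (max_words_per_section : Int) (out : Bool) : Prop := out = section_lengths_ok_alt response max_words_per_section
instance (response : String) (max_words_per_section : Int) (out : Bool) : Decidable (Spec_section_lengths_ok response max_words_per_section out) := by unfold Spec_section_lengths_ok; infer_instance

-- ===== CLAIM (what is proved, stated in full; the proofs are below) =====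
def Claim_equal_section_lengths_ok : Prop := ∀ (response : String) (max_words_per_section : Int), Dom_section_lengths_ok response max_words_per_section → Spec_section_lengths_ok response max_words_per_section (section_lengths_ok response max_words_per_section)

-- ===== LEMMAS AND PROOFS =====

def STEP (st : Int × Bool) (g : Bool) : Int × Bool :=
  if g then (st.1, false) else if st.2 = false then (st.1 + 1, true) else st

theorem step_add (cs : List Bool) : ∀ (n : Int) (w : Bool),
    (cs.foldl STEP (n, w)).1 = n + (cs.foldl STEP (0, w)).1 := by
  induction cs with
  | nil => intro n w; simp
  | cons c rest ih =>
    intro n w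
    simp only [List.foldl_cons, STEP]
    cases c <;> cases w <;> simp only [Bool.false_eq_true, Bool.true_eq_false, reduceIte]
    · rw [ih (n+1) true, ih (0+1) true]; ring
    · exact ih n true
    · exact ih n false
    · exact ih n false

theorem go_length (cs : List Char) : ∀ (cur : List Char) (acc : List (List Char)),
    ((PySem.Chars.split₀.go cs cur acc).length : Int)
      = acc.length + ((cs.map PySem.Chars.isspace).foldl STEP (0, !cur.isEmpty)).1
        + (if cur.isEmpty then 0 else 1) := by
  induction cs with
  | nil =>
    intro cur acc
    by_cases h : cur.isEmpty <;> simp [PySem.Chars.split₀.go, h]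
  | cons c rest ih =>
    intro cur acc
    by_cases hs : PySem.Chars.isspace c
    · by_cases h : cur.isEmpty
      · simp [PySem.Chars.split₀.go, hs, h, ih, STEP]
      · simp [PySem.Chars.split₀.go, hs, h, ih, STEP]; ring
    · by_cases h : cur.isEmpty
      · simp only [PySem.Chars.split₀.go, hs, List.map_cons, List.foldl_cons, STEP, h,
          if_false, Bool.false_eq_true, reduceIte, Bool.not_true]
        rw [ih]
        simp [step_add _ 1 true]
        ring
      · simp [PySem.Chars.split₀.go, hs, h, ih, STEP]

theorem split_len (cs : List Char) :
    ((PySem.Chars.split₀ cs).length : Int)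
      = ((cs.map PySem.Chars.isspace).foldl STEP (0, false)).1 := by
  have := go_length cs [] []
  simpa [PySem.Chars.split₀] using this

theorem foldl_range_seg (sp : List Bool) (b : Int) (hb : b ≤ sp.length) :
    ∀ (n : Nat) (a : Int) (init : Int × Bool), 0 ≤ a → (b - a).toNat = n →
    (PySem.List.pyRange a b 1).foldl (fun st i => STEP st (PySem.List.pyGetD sp i false)) init
      = ((sp.drop a.toNat).take (b - a).toNat).foldl STEP init := by
  intro n
  induction n with
  | zero =>
    intro a init ha hn
    rw [PySem.List.pyRange_one_eq_nil (by omega), hn]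
    simp
  | succ n ih =>
    intro a init ha hn
    have hab : a < b := by omega
    have halen : a.toNat < sp.length := by omega
    rw [PySem.List.pyRange_one_cons hab, List.foldl_cons,
      PySem.List.pyGetD_eq_getElem sp false ha (by exact_mod_cast (by omega : a < (sp.length : Int)))]
    rw [List.drop_eq_getElem_cons halen, hn, List.take_succ_cons, List.foldl_cons]
    have := ih (a + 1) (STEP init sp[a.toNat]) (by omega) (by omega)
    rw [this]
    have : (b - (a + 1)).toNat = n := by omega
    rw [this]
    have : (a + 1).toNat = a.toNat + 1 := by omega
    rw [this]

theorem sectionCount (t : String) (a b : Int) (ha : 0 ≤ a) (hb0 : 0 ≤ b)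
    (hb : b ≤ t.toList.length) :
    (pvCountWordsB (t.toList.map PySem.Chars.isspace) a b).1
      = ((PySem.Str.split₀ (PySem.Str.slice t (some a) (some b))).length : Int) := by
  have hstep : (fun (st : Int × Bool) (i : Int) =>
      if PySem.List.pyGetD (t.toList.map PySem.Chars.isspace) i false then (st.1, false)
      else if st.2 = false then (st.1 + 1, true) else st)
      = fun st i => STEP st (PySem.List.pyGetD (t.toList.map PySem.Chars.isspace) i false) := rfl
  unfold pvCountWordsB
  rw [hstep, foldl_range_seg _ b (by simpa using hb) (b - a).toNat a (0, false) ha rfl]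
  rw [← List.map_drop, ← List.map_take]
  have hslice : (PySem.Str.slice t (some a) (some b)).toList
      = (t.toList.drop a.toNat).take (b - a).toNat := by
    rw [PySem.Str.toList_slice, PySem.Chars.slice_eq_listSlice]
    rw [← Int.toNat_of_nonneg ha, ← Int.toNat_of_nonneg hb0,
      PySem.List.slice_natCast]
    congr 1
    omega
  have hlen : (PySem.Str.split₀ (PySem.Str.slice t (some a) (some b))).length
      = (PySem.Chars.split₀ ((t.toList.drop a.toNat).take (b - a).toNat)).length := by
    rw [← hslice, ← PySem.Str.split₀_map_toList, List.length_map]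
  rw [hlen, split_len]

-- ===== VERDICT (by name: the statement is the Claim_ definition above) =====
set_option maxHeartbeats 1000000 in
theorem section_lengths_ok_spec : Claim_equal_section_lengths_ok := by
  intro response m _
  unfold Spec_section_lengths_ok section_lengths_ok section_lengths_ok_alt
  by_cases h0 : PySem.Str.find response "Diagnosis:" = -1
  · simp only [pvLoopA, pvPositionsB]
    rw [if_pos h0, if_pos h0]
  by_cases h1 : PySem.Str.find response "Evidence:" = -1
  · simp only [pvLoopA, pvPositionsB]
    rw [if_neg h0, if_neg h0, if_pos h1, if_pos h1, if_neg (not_not_intro h1)]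
    simp only [Option.map_none, ite_self]
  by_cases h2 : PySem.Str.find response "Priority:" = -1
  · simp only [pvLoopA, pvPositionsB]
    rw [if_neg h0, if_neg h0, if_neg h1, if_neg h1, if_pos h2, if_pos h2,
      if_pos h1, if_neg (not_not_intro h2)]
    simp only [Option.map_none, ite_self]
  by_cases h3 : PySem.Str.find response "Fix:" = -1
  · simp only [pvLoopA, pvPositionsB]
    rw [if_neg h0, if_neg h0, if_neg h1, if_neg h1, if_neg h2, if_neg h2,
      if_pos h3, if_pos h3, if_pos h1, if_pos h2, if_neg (not_not_intro h3)]
    simp only [Option.map_none, ite_self]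
  by_cases h4 : PySem.Str.find response "Next action:" = -1
  · simp only [pvLoopA, pvPositionsB]
    rw [if_neg h0, if_neg h0, if_neg h1, if_neg h1, if_neg h2, if_neg h2,
      if_neg h3, if_neg h3, if_pos h4, if_pos h4,
      if_pos h1, if_pos h2, if_pos h3, if_neg (not_not_intro h4)]
    simp only [Option.map_none, ite_self]
  -- all five headings present
  have n0 := PySem.Chars.neg_one_le_find response.toList "Diagnosis:".toList
  have n1 := PySem.Chars.neg_one_le_find response.toList "Evidence:".toList
  have n2 := PySem.Chars.neg_one_le_find response.toList "Priority:".toList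
  have n3 := PySem.Chars.neg_one_le_find response.toList "Fix:".toList
  have n4 := PySem.Chars.neg_one_le_find response.toList "Next action:".toList
  have l1 := PySem.Chars.find_le_length response.toList "Evidence:".toList
  have l2 := PySem.Chars.find_le_length response.toList "Priority:".toList
  have l3 := PySem.Chars.find_le_length response.toList "Fix:".toList
  have l4 := PySem.Chars.find_le_length response.toList "Next action:".toList
  rw [PySem.Str.find_eq] at h0 h1 h2 h3 h4
  simp only [pvLoopA, pvPositionsB, PySem.Str.find_eq, PySem.Str.len_eq]
  simp only [h0, h1, h2, h3, h4, if_false, Option.map_some]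
  simp only [List.cons_append, List.nil_append, pvLoopB]
  rw [sectionCount response _ _ (by omega) (by omega) l1,
    sectionCount response _ _ (by omega) (by omega) l2,
    sectionCount response _ _ (by omega) (by omega) l3,
    sectionCount response _ _ (by omega) (by omega) l4,
    sectionCount response _ _ (by omega) (by omega) (le_refl _)]
  rw [if_pos h1, if_pos h2, if_pos h3, if_pos h4]
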